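-- pv_equiv track=rewrite | github.com/dbswl4951/programmers | programmers_level4/호텔 방 배정.py | solution
-- ===== SOURCE A (Python) =====
-- from collections import defaultdict
--
-- def solution(k, room_number):
--     result=[]
--     roomDict= defaultdict(int)
--
--     for number in room_number:
--         num=roomDict[number]
--
--         # 방이 차있는 경우
--         if num:
--             # 방문 한 노드들 저장 => 나중에 갱신 하기 위해서
--             passRomm=[number]
--             while True:
--                 now=num
--                 # 현재 노드 (now)로 다음 노드 얻기
--                 num=roomDict[now]
--                 # 다음 방이 비어있는 경우
--                 if not num:
--                     result.append(now)
--                     roomDict[now]=now+1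
--                     # 이전에 거쳤던 노드들 갱신
--                     for room in passRomm:
--                         roomDict[room]=now+1
--                     break
--                 passRomm.append(num)
--
--         # 방이 비어있어서, 원하는 방을 선택 할 수 있는 경우
--         else:
--             result.append(number)
--             roomDict[number]=number+1
--     return result
-- ===== SOURCE B (Python) =====
-- from collections import defaultdict
--
-- def solution(k, room_number):
--     roomDict = defaultdict(int)
--
--     def find(x):
--         nxt = roomDict[x]
--         if nxt == 0:
--             return x
--         r = find(nxt)
--         roomDict[x] = r + 1
--         return r
--
--     result = []
--     for number in room_number:
--         r = find(number)
--         result.append(r)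
--         roomDict[r] = r + 1
--     return result
-- ===== Notes on version B (the rewrite author's own statement) =====
-- stated objective: alternative
-- what changed: A's explicit while-loop chase with a passRomm list of visited nodes (which skips compressing the first intermediate node) is replaced by a recursive find with path compression on the unwind that compresses every node on the chain; the pointer structure is the same union-find idea but the traversal/update decomposition is different.
-- outside the precondition, e.g. on solution(0, [-2, -4, -4, -4, -2]): A returns [-2, -4, -3, -1, -1], B returns [-2, -4, -3, -1, -2]
import Mathlib
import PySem

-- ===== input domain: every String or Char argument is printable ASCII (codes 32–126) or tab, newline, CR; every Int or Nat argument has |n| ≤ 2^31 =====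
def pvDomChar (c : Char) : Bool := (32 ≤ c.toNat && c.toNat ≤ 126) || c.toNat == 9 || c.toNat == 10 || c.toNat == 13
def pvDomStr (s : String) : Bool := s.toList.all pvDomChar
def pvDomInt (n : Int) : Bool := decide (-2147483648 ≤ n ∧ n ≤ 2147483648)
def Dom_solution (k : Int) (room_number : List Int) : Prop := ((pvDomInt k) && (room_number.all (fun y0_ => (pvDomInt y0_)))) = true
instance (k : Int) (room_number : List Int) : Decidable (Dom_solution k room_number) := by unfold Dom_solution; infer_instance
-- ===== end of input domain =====

-- B replaces A's explicit while-loop chase (with its visited-node list) by a recursive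
-- path-compressing find; same union-find pointer idea, different decomposition (objective: alternative).


-- ===== PORT A =====
-- the while-True loop of A; fuel (dict size + 1) is only a totality guard, proven sufficient below
def solChaseA : Nat → PySem.Dict Int Int → List Int → Int → Int × PySem.Dict Int Int
  | 0, d, _, num => (num, d)
  | fuel+1, d, passRomm, num =>
    let now := num
    let num2 := d.getD now 0
    if num2 = 0 then
      (now, passRomm.foldl (fun dd room => dd.insert room (now + 1)) (d.insert now (now + 1)))
    else
      solChaseA fuel d (passRomm ++ [num2]) num2

-- the body of A's for-loop, over the state (result, roomDict)
def solStepA (st : List Int × PySem.Dict Int Int) (number : Int) : List Int × PySem.Dict Int Int :=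
  let num := st.2.getD number 0
  if num ≠ 0 then
    let p := solChaseA (st.2.size + 1) st.2 [number] num
    (st.1 ++ [p.1], p.2)
  else
    (st.1 ++ [number], st.2.insert number (number + 1))

def solution (k : Int) (room_number : List Int) : List Int :=
  (room_number.foldl solStepA ([], PySem.Dict.empty)).1

-- ===== PORT B =====
-- B's recursive find with path compression on the unwind; fuel is only a totality guard
def solFindB : Nat → PySem.Dict Int Int → Int → Int × PySem.Dict Int Int
  | 0, d, x => (x, d)
  | fuel+1, d, x =>
    let nxt := d.getD x 0
    if nxt = 0 then (x, d)
    else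
      let p := solFindB fuel d nxt
      (p.1, p.2.insert x (p.1 + 1))

def solStepB (st : List Int × PySem.Dict Int Int) (number : Int) : List Int × PySem.Dict Int Int :=
  let p := solFindB (st.2.size + 1) st.2 number
  (st.1 ++ [p.1], p.2.insert p.1 (p.1 + 1))

def solution_alt (k : Int) (room_number : List Int) : List Int :=
  (room_number.foldl solStepB ([], PySem.Dict.empty)).1

-- ===== PRECONDITION & SPEC =====
-- Pre_ excludes lists containing a negative room number: there the 0 empty-marker collides with the
-- stored successor pointer of room -1 (-1 + 1 = 0), and which rooms the two equally accidental
-- compression orders of A and B re-mark as free diverges (hotel rooms are positive in the source task).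
def Pre_solution (k : Int) (room_number : List Int) : Prop := ∀ x ∈ room_number, 0 ≤ x
instance (k : Int) (room_number : List Int) : Decidable (Pre_solution k room_number) := by unfold Pre_solution; infer_instance
def pvWitness_solution : Int × List Int := (10, [1, 1, 2])
def Spec_solution (k : Int) (room_number : List Int) (out : List Int) : Prop := out = solution_alt k room_number
instance (k : Int) (room_number : List Int) (out : List Int) : Decidable (Spec_solution k room_number out) := by unfold Spec_solution; infer_instance

-- ===== CLAIM (what is proved, stated in full; the proofs are below) =====
def Claim_equal_solution : Prop := ∀ (k : Int) (room_number : List Int), Dom_solution k room_number → Pre_solution k room_number → Spec_solution k room_number (solution k room_number)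

-- ===== LEMMAS AND PROOFS =====

def pvF (d : PySem.Dict Int Int) (x : Int) : Int := d.getD x 0

-- dict invariant at query boundaries: every stored pointer points strictly forward from a
-- nonnegative room and skips only occupied rooms
def pvInv (d : PySem.Dict Int Int) : Prop :=
  ∀ x : Int, pvF d x ≠ 0 → 0 ≤ x ∧ x < pvF d x ∧ ∀ m : Int, x < m → m < pvF d x → pvF d m ≠ 0

-- mid-query invariant of B's find: pointers may additionally jump over the root r
-- (r is re-occupied by the caller right after find returns)
def pvInv' (d : PySem.Dict Int Int) (r : Int) : Prop :=
  ∀ x : Int, pvF d x ≠ 0 → 0 ≤ x ∧ x < pvF d x ∧ ∀ m : Int, x < m → m < pvF d x → (pvF d m ≠ 0 ∨ m = r)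

-- the two dicts mark the same rooms as free
def pvZAgree (dA dB : PySem.Dict Int Int) : Prop := ∀ x : Int, (pvF dA x = 0 ↔ pvF dB x = 0)

-- fuel measure: number of keys ≥ v
def pvK (d : PySem.Dict Int Int) (v : Int) : Nat := (d.keys.filter (fun y => decide (v ≤ y))).length

lemma pvF_insert (d : PySem.Dict Int Int) (kk v x : Int) :
    pvF (d.insert kk v) x = if x = kk then v else pvF d x := by
  simp [pvF, PySem.Dict.getD_insert]

lemma pvF_mem_keys {d : PySem.Dict Int Int} {x : Int} (h : pvF d x ≠ 0) : x ∈ d.keys := by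
  by_contra hc
  have hcon : d.contains x = false := by
    rw [PySem.Dict.contains_eq_decide_mem_keys]; simpa using hc
  exact h (by simpa [pvF] using PySem.Dict.getD_of_not_contains (d := d) (k := x) (d0 := 0) hcon)

lemma pvK_le_size (d : PySem.Dict Int Int) (v : Int) : pvK d v ≤ d.size := by
  have h1 : (d.keys.filter (fun y => decide (v ≤ y))).length ≤ d.keys.length := List.length_filter_le _ _
  have h2 : d.keys.length = d.size := by simp [PySem.Dict.keys, PySem.Dict.size]
  unfold pvK; omega

lemma pvK_lt {d : PySem.Dict Int Int} {v v' : Int} (hv : v ∈ d.keys) (hlt : v < v') :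
    pvK d v' < pvK d v := by
  unfold pvK
  have hsub : d.keys.filter (fun y => decide (v' ≤ y)) = (d.keys.filter (fun y => decide (v ≤ y))).filter (fun y => decide (v' ≤ y)) := by
    rw [List.filter_filter]
    apply List.filter_congr
    intro y _
    by_cases h : v' ≤ y
    · simp [h]; omega
    · simp [h]
  rw [hsub]
  apply List.length_filter_lt_length_iff_exists.mpr
  exact ⟨v, by simp [List.mem_filter, hv], by simp; omega⟩

lemma pvF_foldl_insert_const : ∀ (l : List Int) (c : Int) (d : PySem.Dict Int Int) (x : Int),
    pvF (l.foldl (fun dd r => dd.insert r c) d) x = if x ∈ l then c else pvF d x := by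
  intro l
  induction l with
  | nil => intro c d x; simp
  | cons a t ih =>
    intro c d x
    simp only [List.foldl_cons, ih, pvF_insert, List.mem_cons]
    by_cases hx : x ∈ t
    · simp [hx]
    · by_cases hxa : x = a <;> simp [hx, hxa]

lemma pvInv'_insert {d : PySem.Dict Int Int} {r : Int} (h : pvInv' d r) (hr : 0 ≤ r) :
    pvInv (d.insert r (r + 1)) := by
  intro x hx
  rw [pvF_insert] at hx
  by_cases hxr : x = r
  · subst hxr
    refine ⟨hr, ?_, ?_⟩
    · rw [pvF_insert]; simp
    · intro m hm1 hm2; rw [pvF_insert] at hm2 ⊢; simp at hm2; omega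
  · simp [hxr] at hx
    obtain ⟨h1, h2, h3⟩ := h x hx
    refine ⟨h1, ?_, ?_⟩
    · rw [pvF_insert]; simp [hxr, h2]
    · intro m hm1 hm2
      rw [pvF_insert] at hm2 ⊢
      simp [hxr] at hm2
      by_cases hmr : m = r
      · simp [hmr]; omega
      · simp [hmr]
        rcases h3 m hm1 hm2 with h' | h'
        · exact h'
        · exact absurd h' hmr

lemma chaseA_ok : ∀ (fuel : Nat) (d : PySem.Dict Int Int) (pass : List Int) (v : Int),
    pvInv d → 0 < v →
    (∀ p ∈ pass, 0 ≤ p ∧ p ≤ v ∧ ∀ m : Int, p < m → m < v → pvF d m ≠ 0) →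
    (∀ p ∈ pass, pvF d p ≠ 0 ∨ p = v) →
    pvK d v < fuel →
    v ≤ (solChaseA fuel d pass v).1 ∧ pvF d (solChaseA fuel d pass v).1 = 0 ∧
    (∀ m : Int, v ≤ m → m < (solChaseA fuel d pass v).1 → pvF d m ≠ 0) ∧
    pvInv (solChaseA fuel d pass v).2 ∧
    (∀ x : Int, pvF (solChaseA fuel d pass v).2 x = 0 ↔ (pvF d x = 0 ∧ x ≠ (solChaseA fuel d pass v).1)) := by
  intro fuel
  induction fuel with
  | zero => intro d pass v _ _ _ _ hf; omega
  | succ f ih =>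
    intro d pass v hInv hv hpass hpocc hf
    by_cases h0 : d.getD v 0 = 0
    · -- base: room v is free; write v+1 to v and to every room of pass
      have heval : solChaseA (f+1) d pass v =
          (v, pass.foldl (fun dd room => dd.insert room (v + 1)) (d.insert v (v + 1))) := by
        simp only [solChaseA, h0]
        rfl
      rw [heval]
      simp only
      have hFv : pvF d v = 0 := by simpa [pvF] using h0
      have hc : ∀ x : Int, pvF (pass.foldl (fun dd room => dd.insert room (v + 1)) (d.insert v (v + 1))) x
          = if x ∈ pass then v + 1 else if x = v then v + 1 else pvF d x := by
        intro x; rw [pvF_foldl_insert_const, pvF_insert]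
      have hvne : v + 1 ≠ 0 := by omega
      refine ⟨le_refl v, hFv, by intro m h1 h2; omega, ?_, ?_⟩
      · -- pvInv of the updated dict
        intro x hx
        rw [hc] at hx
        have hocc : ∀ m : Int, (m ∈ pass ∨ m = v ∨ pvF d m ≠ 0) →
            pvF (pass.foldl (fun dd room => dd.insert room (v + 1)) (d.insert v (v + 1))) m ≠ 0 := by
          intro m hm
          rw [hc]
          rcases hm with h | h | h
          · simp [h]; omega
          · by_cases hmp : m ∈ pass
            · simp [hmp]; omega
            · simp [hmp, h]; omega
          · by_cases hmp : m ∈ pass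
            · simp [hmp]; omega
            · by_cases hmv : m = v
              · simp [hmv]; omega
              · simpa [hmp, hmv] using h
        by_cases hxp : x ∈ pass
        · obtain ⟨a, b, c⟩ := hpass x hxp
          refine ⟨a, by rw [hc]; simp [hxp]; omega, ?_⟩
          intro m hm1 hm2
          rw [hc] at hm2
          simp [hxp] at hm2
          apply hocc
          by_cases hmv : m = v
          · exact Or.inr (Or.inl hmv)
          · have : m < v := by omega
            exact Or.inr (Or.inr (c m hm1 this))
        · by_cases hxv : x = v
          · subst hxv
            refine ⟨by omega, by rw [hc]; simp [hxp], ?_⟩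
            intro m hm1 hm2
            rw [hc] at hm2
            simp [hxp] at hm2
            omega
          · simp [hxp, hxv] at hx
            obtain ⟨a, b, c⟩ := hInv x hx
            refine ⟨a, by rw [hc]; simp [hxp, hxv]; omega, ?_⟩
            intro m hm1 hm2
            rw [hc] at hm2
            simp [hxp, hxv] at hm2
            exact hocc m (Or.inr (Or.inr (c m hm1 hm2)))
      · -- zero-set: exactly v becomes occupied
        intro x
        rw [hc]
        by_cases hxp : x ∈ pass
        · simp [hxp, hvne]
          intro hz
          rcases hpocc x hxp with h | h
          · exact absurd hz h
          · exact h
        · by_cases hxv : x = v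
          · simp [hxv, hvne, hFv]
          · simp [hxp, hxv]
    · -- recursive case: follow the pointer
      have hFv : pvF d v ≠ 0 := by simpa [pvF] using h0
      obtain ⟨_, hlt, hmid⟩ := hInv v hFv
      set v' := pvF d v with hv'
      have heval : solChaseA (f+1) d pass v = solChaseA f d (pass ++ [v']) v' := by
        simp only [solChaseA, h0]
        rfl
      rw [heval]
      have hpass' : ∀ p ∈ pass ++ [v'], 0 ≤ p ∧ p ≤ v' ∧ ∀ m : Int, p < m → m < v' → pvF d m ≠ 0 := by
        intro p hp
        rcases List.mem_append.mp hp with h | h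
        · obtain ⟨a, b, c⟩ := hpass p h
          refine ⟨a, by omega, ?_⟩
          intro m h1 h2
          rcases Int.lt_or_le m v with hc2 | hc2
          · exact c m h1 hc2
          · rcases Int.lt_or_le v m with hc3 | hc3
            · exact hmid m hc3 h2
            · have : m = v := by omega
              rw [this]; exact hFv
        · simp at h; subst h
          exact ⟨by omega, le_refl _, by intro m h1 h2; omega⟩
      have hpocc' : ∀ p ∈ pass ++ [v'], pvF d p ≠ 0 ∨ p = v' := by
        intro p hp
        rcases List.mem_append.mp hp with h | h
        · rcases hpocc p h with h' | h'
          · exact Or.inl h'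
          · subst h'; exact Or.inl hFv
        · simp at h; exact Or.inr h
      have hf' : pvK d v' < f := by
        have := pvK_lt (pvF_mem_keys hFv) hlt
        omega
      obtain ⟨ih1, ih2, ih3, ih4, ih5⟩ := ih d (pass ++ [v']) v' hInv (by omega) hpass' hpocc' hf'
      refine ⟨by omega, ih2, ?_, ih4, ih5⟩
      intro m hm1 hm2
      rcases Int.lt_or_le m v' with hc2 | hc2
      · rcases eq_or_lt_of_le hm1 with he | hl
        · rw [← he]; exact hFv
        · exact hmid m hl hc2
      · exact ih3 m hc2 hm2

lemma findB_ok : ∀ (fuel : Nat) (d : PySem.Dict Int Int) (x : Int),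
    pvInv d → 0 ≤ x →
    pvK d x < fuel →
    x ≤ (solFindB fuel d x).1 ∧ pvF d (solFindB fuel d x).1 = 0 ∧
    (∀ m : Int, x ≤ m → m < (solFindB fuel d x).1 → pvF d m ≠ 0) ∧
    pvInv' (solFindB fuel d x).2 (solFindB fuel d x).1 ∧
    (∀ y : Int, pvF (solFindB fuel d x).2 y = 0 ↔ pvF d y = 0) := by
  intro fuel
  induction fuel with
  | zero => intro d x _ _ hf; omega
  | succ f ih =>
    intro d x hInv hx hf
    by_cases h0 : d.getD x 0 = 0
    · -- base: room x is free
      simp only [solFindB, h0, if_pos]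
      refine ⟨le_refl x, by simpa [pvF] using h0, ?_, ?_, by intro y; trivial⟩
      · intro m hm1 hm2; omega
      · intro y hy; obtain ⟨a, b, c⟩ := hInv y hy
        exact ⟨a, b, fun m u v => Or.inl (c m u v)⟩
    · -- recursive case
      have hFx : pvF d x ≠ 0 := by simpa [pvF] using h0
      obtain ⟨_, hlt, hmid⟩ := hInv x hFx
      set nxt := pvF d x with hnxt
      have hrec : pvK d nxt < f := by
        have := pvK_lt (pvF_mem_keys hFx) hlt
        omega
      have hnn : 0 ≤ nxt := by omega
      obtain ⟨ih1, ih2, ih3, ih4, ih5⟩ := ih d nxt hInv hnn hrec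
      set r := (solFindB f d nxt).1 with hr
      set d1 := (solFindB f d nxt).2 with hd1
      have heval : solFindB (f+1) d x = (r, d1.insert x (r + 1)) := by
        simp only [solFindB, h0, hr, hd1]
        rfl
      rw [heval]
      simp only
      have hrne : r + 1 ≠ 0 := by omega
      have hxner : x ≠ r := by omega
      refine ⟨by omega, ih2, ?_, ?_, ?_⟩
      · -- minimality on [x, r)
        intro m hm1 hm2
        rcases eq_or_lt_of_le hm1 with hme | hml
        · rw [← hme]; exact hFx
        · rcases Int.lt_or_le m nxt with hc | hc
          · exact hmid m hml hc
          · exact ih3 m hc hm2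
      · -- pvInv' of d1.insert x (r+1) with root r
        intro y hy
        rw [pvF_insert] at hy
        by_cases hyx : y = x
        · subst hyx
          refine ⟨hx, ?_, ?_⟩
          · rw [pvF_insert]; simp; omega
          · intro m hm1 hm2
            rw [pvF_insert] at hm2 ⊢
            simp at hm2
            -- m ∈ (y, r]
            by_cases hmr : m = r
            · exact Or.inr hmr
            · left
              have hmlt : m < r := by omega
              have hFdm : pvF d m ≠ 0 := by
                rcases Int.lt_or_le m nxt with hc | hc
                · exact hmid m hm1 hc
                · exact ih3 m hc hmlt
              have hFd1m : pvF d1 m ≠ 0 := fun hz => hFdm ((ih5 m).mp hz)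
              by_cases hmx : m = y
              · simp [hmx]; omega
              · simpa [hmx] using hFd1m
        · simp [hyx] at hy
          obtain ⟨a, b, c⟩ := ih4 y hy
          refine ⟨a, ?_, ?_⟩
          · rw [pvF_insert]; simp [hyx]; exact b
          · intro m hm1 hm2
            rw [pvF_insert] at hm2 ⊢
            simp [hyx] at hm2
            by_cases hmx : m = x
            · simp [hmx]; left; omega
            · simp [hmx]
              exact c m hm1 hm2
      · -- zero-sets agree (x was occupied already)
        intro y
        rw [pvF_insert]
        by_cases hyx : y = x
        · subst hyx; simp [hrne]; exact hFx
        · simp [hyx]; exact ih5 y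

lemma step_ok {sA sB : List Int × PySem.Dict Int Int} {q : Int}
    (h1 : sA.1 = sB.1) (h2 : pvInv sA.2) (h3 : pvInv sB.2) (h4 : pvZAgree sA.2 sB.2)
    (hq : 0 ≤ q) :
    (solStepA sA q).1 = (solStepB sB q).1 ∧ pvInv (solStepA sA q).2 ∧
    pvInv (solStepB sB q).2 ∧ pvZAgree (solStepA sA q).2 (solStepB sB q).2 := by
  by_cases h0 : sA.2.getD q 0 = 0
  · -- room q free in both dicts
    have hFA : pvF sA.2 q = 0 := by simpa [pvF] using h0
    have hFB : pvF sB.2 q = 0 := (h4 q).mp hFA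
    have hB0 : sB.2.getD q 0 = 0 := by simpa [pvF] using hFB
    have hevalA : solStepA sA q = (sA.1 ++ [q], sA.2.insert q (q + 1)) := by
      simp [solStepA, h0]
    have hevalB : solStepB sB q = (sB.1 ++ [q], sB.2.insert q (q + 1)) := by
      have hfind : solFindB (sB.2.size + 1) sB.2 q = (q, sB.2) := by
        simp [solFindB, hB0]
      simp [solStepB, hfind]
    rw [hevalA, hevalB]
    have hqne : q + 1 ≠ 0 := by omega
    refine ⟨by simp [h1], ?_, ?_, ?_⟩
    · exact pvInv'_insert (fun x hx => (h2 x hx).imp id (fun ⟨a, b⟩ => ⟨a, fun m u v => Or.inl (b m u v)⟩)) hq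
    · exact pvInv'_insert (fun x hx => (h3 x hx).imp id (fun ⟨a, b⟩ => ⟨a, fun m u v => Or.inl (b m u v)⟩)) hq
    · intro x
      rw [pvF_insert, pvF_insert]
      by_cases hxq : x = q
      · simp [hxq]
      · simp [hxq]; exact h4 x
  · -- room q occupied in both dicts
    have hFA : pvF sA.2 q ≠ 0 := by simpa [pvF] using h0
    have hFB : pvF sB.2 q ≠ 0 := fun h => hFA ((h4 q).mpr h)
    obtain ⟨hq0, hltA, hmidA⟩ := h2 q hFA
    obtain ⟨_, hltB, hmidB⟩ := h3 q hFB
    set vA := pvF sA.2 q with hvA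
    obtain ⟨a1, a2, a3, a4, a5⟩ := chaseA_ok (sA.2.size + 1) sA.2 [q] vA h2 (by omega)
      (by intro p hp; simp at hp; subst hp
          exact ⟨hq, by omega, fun m u v => hmidA m u v⟩)
      (by intro p hp; simp at hp; subst hp; exact Or.inl hFA)
      (by have := pvK_le_size sA.2 vA; omega)
    obtain ⟨b1, b2, b3, b4, b5⟩ := findB_ok (sB.2.size + 1) sB.2 q h3 hq
      (by have := pvK_le_size sB.2 q; omega)
    set rA := (solChaseA (sA.2.size + 1) sA.2 [q] vA).1 with hrA
    set dA' := (solChaseA (sA.2.size + 1) sA.2 [q] vA).2 with hdA'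
    set rB := (solFindB (sB.2.size + 1) sB.2 q).1 with hrB
    set dB1 := (solFindB (sB.2.size + 1) sB.2 q).2 with hdB1
    -- both return the minimal free room ≥ q
    have hAchar : ∀ m : Int, q ≤ m → m < rA → pvF sA.2 m ≠ 0 := by
      intro m hm1 hm2
      rcases Int.lt_or_le m vA with hc | hc
      · rcases eq_or_lt_of_le hm1 with he | hl
        · rw [← he]; exact hFA
        · exact hmidA m hl hc
      · exact a3 m hc hm2
    have hreq : rA = rB := by
      rcases lt_trichotomy rA rB with h | h | h
      · exact absurd ((h4 rA).mp a2) (b3 rA (by omega) h)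
      · exact h
      · exact absurd ((h4 rB).mpr b2) (hAchar rB b1 h)
    have hevalA : solStepA sA q = (sA.1 ++ [rA], dA') := by
      simp only [solStepA, hrA, hdA']
      rw [if_pos (by simpa [pvF] using hFA)]
      rfl
    have hevalB : solStepB sB q = (sB.1 ++ [rB], dB1.insert rB (rB + 1)) := by
      simp only [solStepB, hrB, hdB1]
    rw [hevalA, hevalB]
    have hrBnn : 0 ≤ rB := by omega
    have hrne : rB + 1 ≠ 0 := by omega
    refine ⟨by simp [h1, hreq], a4, pvInv'_insert b4 hrBnn, ?_⟩
    intro x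
    rw [a5 x, pvF_insert]
    by_cases hxr : x = rB
    · simp [hxr, hrne, hreq]
    · simp [hxr, hreq]
      rw [b5 x]
      exact h4 x

lemma fold_ok : ∀ (l : List Int) (sA sB : List Int × PySem.Dict Int Int),
    sA.1 = sB.1 → pvInv sA.2 → pvInv sB.2 → pvZAgree sA.2 sB.2 →
    (∀ x ∈ l, 0 ≤ x) →
    (l.foldl solStepA sA).1 = (l.foldl solStepB sB).1 := by
  intro l
  induction l with
  | nil => intro sA sB h1 _ _ _ _; simpa using h1
  | cons q t ih =>
    intro sA sB h1 h2 h3 h4 hpre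
    have hq : 0 ≤ q := hpre q (by simp)
    obtain ⟨e1, e2, e3, e4⟩ := step_ok h1 h2 h3 h4 hq
    exact ih _ _ e1 e2 e3 e4 (fun x hx => hpre x (by simp [hx]))

-- ===== VERDICT (by name: the statement is the Claim_ definition above) =====
theorem solution_spec : Claim_equal_solution := by
  intro k room_number _ hpre
  unfold Spec_solution solution solution_alt
  exact fold_ok room_number ([], PySem.Dict.empty) ([], PySem.Dict.empty) rfl
    (by intro x hx; simp [pvF, PySem.Dict.getD_empty] at hx)
    (by intro x hx; simp [pvF, PySem.Dict.getD_empty] at hx)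
    (by intro x; rfl) hpre
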